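-- pv_equiv track=rewrite | github.com/olayinkade/LightUpPuzzle | light_up_puzzle.py | valid_rows_and_cols
-- ===== SOURCE A (Python) =====
-- def valid_rows_and_cols(row, col, puzzle):
--     bulb_seen = False
--     wall_seen = False
--
--     bulb_seen_row = False
--     wall_seen_row = False
--     for y in range(len(puzzle)):
--         if bulb_seen and puzzle[y][col] == "b":
--             return False
--         elif wall_seen and puzzle[y][col] == "b":
--             wall_seen = False
--             bulb_seen = True
--         elif puzzle[y][col] == "b":
--             bulb_seen = True
--         elif bulb_seen and puzzle[y][col].isdigit():
--             wall_seen = True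
--             bulb_seen = False
--
--         if bulb_seen_row and puzzle[row][y] == "b":
--             return False
--         elif wall_seen_row and puzzle[row][y] == "b":
--             wall_seen_row = False
--             bulb_seen_row = True
--         elif puzzle[row][y] == "b":
--             bulb_seen_row = True
--         elif bulb_seen_row and puzzle[row][y].isdigit():
--             wall_seen_row = True
--             bulb_seen_row = False
--
--     return True
-- ===== SOURCE B (Python) =====
-- def _segments(line):
--     segments = []
--     current = []
--     for cell in line:
--         if cell.isdigit():
--             segments.append(current)
--             current = []
--         else:
--             current.append(cell)
--     segments.append(current)
--     return segments
--
--
-- def valid_rows_and_cols(row, col, puzzle):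
--     n = len(puzzle)
--     column = [puzzle[y][col] for y in range(n)]
--     row_line = [puzzle[row][y] for y in range(n)]
--     return all(seg.count("b") <= 1
--                for line in (column, row_line)
--                for seg in _segments(line))
-- ===== Notes on version B (the rewrite author's own statement) =====
-- stated objective: alternative
-- what changed: B extracts the column and the row as lists, splits each into digit-delimited segments, and checks every segment contains at most one 'b' via seg.count, replacing A's single interleaved loop with four boolean state flags and per-cell early return.
-- outside the precondition, e.g. on valid_rows_and_cols(0, 0, [['b'], ['b']]): A returns False, B raises IndexError
import Mathlib
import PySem

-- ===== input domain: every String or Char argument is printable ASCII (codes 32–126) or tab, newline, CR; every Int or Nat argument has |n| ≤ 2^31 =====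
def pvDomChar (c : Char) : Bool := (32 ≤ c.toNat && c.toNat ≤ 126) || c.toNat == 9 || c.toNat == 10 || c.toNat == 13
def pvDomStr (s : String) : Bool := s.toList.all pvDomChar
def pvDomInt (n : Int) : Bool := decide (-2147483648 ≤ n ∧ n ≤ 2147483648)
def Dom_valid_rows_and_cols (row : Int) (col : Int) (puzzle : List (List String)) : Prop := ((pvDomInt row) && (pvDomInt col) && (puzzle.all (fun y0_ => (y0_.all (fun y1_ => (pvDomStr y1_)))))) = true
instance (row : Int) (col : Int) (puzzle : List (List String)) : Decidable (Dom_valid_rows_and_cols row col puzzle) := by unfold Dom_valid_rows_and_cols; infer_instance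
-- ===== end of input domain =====

-- B splits the extracted column and row into digit-delimited segments and checks each segment holds at most one bulb, instead of A's interleaved four-flag state machine (objective: alternative).

-- cell access puzzle[i][j]; exact inside Pre_ (both indices in range there); "" is a don't-care placeholder outside the claim
def pvCell (puzzle : List (List String)) (i j : Int) : String :=
  ((PySem.List.pyGet? puzzle i).bind (fun r => PySem.List.pyGet? r j)).getD ""

-- ===== PORT A =====
def vrcA_loop (row : Int) (col : Int) (puzzle : List (List String)) :
    List Nat → Bool → Bool → Bool → Bool → Bool
  | [], _, _, _, _ => true
  | y :: ys, bulb, wall, bulbR, wallR =>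
    let c := pvCell puzzle (y : Int) col
    if bulb && (c == "b") then false
    else
      let s :=
        if wall && (c == "b") then (true, false)
        else if c == "b" then (true, wall)
        else if bulb && PySem.Str.strIsdigit c then (false, true)
        else (bulb, wall)
      let r := pvCell puzzle row (y : Int)
      if bulbR && (r == "b") then false
      else
        let t :=
          if wallR && (r == "b") then (true, false)
          else if r == "b" then (true, wallR)
          else if bulbR && PySem.Str.strIsdigit r then (false, true)
          else (bulbR, wallR)
        vrcA_loop row col puzzle ys s.1 s.2 t.1 t.2

def valid_rows_and_cols (row : Int) (col : Int) (puzzle : List (List String)) : Bool :=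
  vrcA_loop row col puzzle (List.range puzzle.length) false false false false

-- ===== PORT B =====
-- _segments: split the line at digit cells; digit cells belong to no segment
def pvSegs : List String → List String → List (List String)
  | [], cur => [cur]
  | c :: cs, cur =>
    if PySem.Str.strIsdigit c then cur :: pvSegs cs []
    else pvSegs cs (cur ++ [c])

def valid_rows_and_cols_alt (row : Int) (col : Int) (puzzle : List (List String)) : Bool :=
  let n := puzzle.length
  let column := (List.range n).map (fun y : Nat => pvCell puzzle (y : Int) col)
  let rowLine := (List.range n).map (fun y : Nat => pvCell puzzle row (y : Int))
  [column, rowLine].all (fun line =>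
    (pvSegs line []).all (fun seg => decide (seg.count "b" ≤ 1)))

-- ===== PRECONDITION & SPEC =====
-- Pre_ excludes the inputs on which one of the n column/row cell accesses is out of range: there
-- the Python A either raises IndexError itself or returns False before reaching the bad access,
-- while B builds both full lines up front and raises IndexError.
def Pre_valid_rows_and_cols (row : Int) (col : Int) (puzzle : List (List String)) : Prop :=
  puzzle = [] ∨
  ((PySem.List.pyGet? puzzle row).isSome = true ∧
   puzzle.length ≤ ((PySem.List.pyGet? puzzle row).getD []).length ∧
   ∀ line ∈ puzzle, (PySem.List.pyGet? line col).isSome = true)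

instance (row : Int) (col : Int) (puzzle : List (List String)) : Decidable (Pre_valid_rows_and_cols row col puzzle) := by
  unfold Pre_valid_rows_and_cols; infer_instance

def pvWitness_valid_rows_and_cols : Int × Int × List (List String) :=
  (0, 0, [["b", "1"], [".", "b"]])

def Spec_valid_rows_and_cols (row : Int) (col : Int) (puzzle : List (List String)) (out : Bool) : Prop := out = valid_rows_and_cols_alt row col puzzle
instance (row : Int) (col : Int) (puzzle : List (List String)) (out : Bool) : Decidable (Spec_valid_rows_and_cols row col puzzle out) := by unfold Spec_valid_rows_and_cols; infer_instance

-- ===== CLAIM =====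
def Claim_equal_valid_rows_and_cols : Prop := ∀ (row : Int) (col : Int) (puzzle : List (List String)), Dom_valid_rows_and_cols row col puzzle → Pre_valid_rows_and_cols row col puzzle → Spec_valid_rows_and_cols row col puzzle (valid_rows_and_cols row col puzzle)

-- ===== LEMMAS AND PROOFS =====

-- A's column state machine run alone (over indices)
def vrcCol (puzzle : List (List String)) (col : Int) : List Nat → Bool → Bool → Bool
  | [], _, _ => true
  | y :: ys, bulb, wall =>
    let c := pvCell puzzle (y : Int) col
    if bulb && (c == "b") then false
    else
      let s :=
        if wall && (c == "b") then (true, false)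
        else if c == "b" then (true, wall)
        else if bulb && PySem.Str.strIsdigit c then (false, true)
        else (bulb, wall)
      vrcCol puzzle col ys s.1 s.2

-- A's row state machine run alone (over indices)
def vrcRow (puzzle : List (List String)) (row : Int) : List Nat → Bool → Bool → Bool
  | [], _, _ => true
  | y :: ys, bulb, wall =>
    let r := pvCell puzzle row (y : Int)
    if bulb && (r == "b") then false
    else
      let t :=
        if wall && (r == "b") then (true, false)
        else if r == "b" then (true, wall)
        else if bulb && PySem.Str.strIsdigit r then (false, true)
        else (bulb, wall)
      vrcRow puzzle row ys t.1 t.2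

-- the same machine over a list of cells
def vrcLine : List String → Bool → Bool → Bool
  | [], _, _ => true
  | c :: cs, bulb, wall =>
    if bulb && (c == "b") then false
    else
      let s :=
        if wall && (c == "b") then (true, false)
        else if c == "b" then (true, wall)
        else if bulb && PySem.Str.strIsdigit c then (false, true)
        else (bulb, wall)
      vrcLine cs s.1 s.2

-- A's interleaved loop is the conjunction of the two independent machines
theorem vrcA_split (row col : Int) (puzzle : List (List String)) :
    ∀ (ys : List Nat) (b w br wr : Bool),
      vrcA_loop row col puzzle ys b w br wr
        = (vrcCol puzzle col ys b w && vrcRow puzzle row ys br wr) := by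
  intro ys
  induction ys with
  | nil => intro b w br wr; simp [vrcA_loop, vrcCol, vrcRow]
  | cons y ys ih =>
    intro b w br wr
    simp only [vrcA_loop, vrcCol, vrcRow]
    by_cases hc : (b && (pvCell puzzle (y : Int) col == "b")) = true
    · simp [hc]
    · by_cases hr : (br && (pvCell puzzle row (y : Int) == "b")) = true
      · simp [hc, hr]
      · simp [hc, hr, ih]

theorem vrcCol_eq_line (puzzle : List (List String)) (col : Int) :
    ∀ (ys : List Nat) (b w : Bool),
      vrcCol puzzle col ys b w
        = vrcLine (ys.map (fun y : Nat => pvCell puzzle (y : Int) col)) b w := by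
  intro ys
  induction ys with
  | nil => intro b w; rfl
  | cons y ys ih => intro b w; simp only [vrcCol, vrcLine, List.map_cons]; rw [ih]

theorem vrcRow_eq_line (puzzle : List (List String)) (row : Int) :
    ∀ (ys : List Nat) (b w : Bool),
      vrcRow puzzle row ys b w
        = vrcLine (ys.map (fun y : Nat => pvCell puzzle row (y : Int))) b w := by
  intro ys
  induction ys with
  | nil => intro b w; rfl
  | cons y ys ih => intro b w; simp only [vrcRow, vrcLine, List.map_cons]; rw [ih]

-- a segment already holding two bulbs poisons the whole split
theorem segs_big (cs : List String) :
    ∀ (cur : List String), 2 ≤ cur.count "b" →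
      (pvSegs cs cur).all (fun seg => decide (seg.count "b" ≤ 1)) = false := by
  induction cs with
  | nil => intro cur h; simp [pvSegs]; omega
  | cons c cs ih =>
    intro cur h
    by_cases hd : PySem.Chars.strIsdigit c.toList = true
    · simp [pvSegs, PySem.Str.strIsdigit, hd]
      intro hle
      exact absurd h (by omega)
    · simp only [pvSegs, PySem.Str.strIsdigit, hd, if_false, Bool.false_eq_true]
      exact ih (cur ++ [c]) (by simp [List.count_append]; omega)

-- the state machine equals the segment check (wall flag irrelevant; bulb flag = current segment's bulb count)
theorem vrcLine_eq_segs :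
    ∀ (cs : List String) (b w : Bool) (cur : List String),
      cur.count "b" = (if b then 1 else 0) →
      vrcLine cs b w
        = (pvSegs cs cur).all (fun seg => decide (seg.count "b" ≤ 1)) := by
  intro cs
  induction cs with
  | nil =>
    intro b w cur h
    cases b <;> simp [vrcLine, pvSegs, h]
  | cons c cs ih =>
    intro b w cur h
    by_cases hcb : (c == "b") = true
    · have hc : c = "b" := by simpa using hcb
      subst hc
      have hdig : PySem.Chars.strIsdigit ("b" : String).toList = false := by decide
      cases b with
      | true =>
        have h2 : 2 ≤ (cur ++ ["b"]).count "b" := by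
          simp [List.count_append, h]
        simp only [vrcLine, pvSegs, PySem.Str.strIsdigit, hdig, Bool.false_eq_true,
          if_false]
        simp only [BEq.rfl, Bool.and_true, if_true]
        exact (segs_big cs (cur ++ ["b"]) h2).symm
      | false =>
        simp only [vrcLine, pvSegs, PySem.Str.strIsdigit, hdig, Bool.false_eq_true,
          if_false, Bool.false_and]
        simp only [BEq.rfl, Bool.and_true, if_true, if_false, Bool.false_eq_true]
        cases w <;> simp only [if_true, if_false, Bool.false_eq_true] <;>
          exact ih true _ (cur ++ ["b"]) (by simp [List.count_append, h])
    · by_cases hd : PySem.Chars.strIsdigit c.toList = true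
      · cases b with
        | true =>
          simp only [vrcLine, pvSegs, PySem.Str.strIsdigit, hd, hcb, if_true,
            Bool.and_false, Bool.false_eq_true, if_false, Bool.true_and]
          rw [ih false true [] (by simp)]
          simp [h]
        | false =>
          simp only [vrcLine, pvSegs, PySem.Str.strIsdigit, hd, hcb, if_true,
            Bool.and_false, Bool.false_and, Bool.false_eq_true, if_false]
          rw [ih false w [] (by simp)]
          simp [h]
      · have hcnt : c ≠ "b" := by simpa using hcb
        have h' : (cur ++ [c]).count "b" = (if b then 1 else 0) := by
          simp [List.count_append, hcnt, h]
        cases b with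
        | true =>
          simp only [vrcLine, pvSegs, PySem.Str.strIsdigit, hd, hcb, Bool.true_and,
            Bool.and_false, Bool.false_eq_true, if_false]
          exact ih true w (cur ++ [c]) h'
        | false =>
          simp only [vrcLine, pvSegs, PySem.Str.strIsdigit, hd, hcb, Bool.false_and,
            Bool.and_false, Bool.false_eq_true, if_false]
          exact ih false w (cur ++ [c]) h' 

-- ===== VERDICT =====
theorem valid_rows_and_cols_spec : Claim_equal_valid_rows_and_cols := by
  intro row col puzzle _ _
  unfold Spec_valid_rows_and_cols valid_rows_and_cols valid_rows_and_cols_alt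
  rw [vrcA_split]
  simp only [List.all_cons, List.all_nil, Bool.and_true]
  rw [vrcCol_eq_line, vrcRow_eq_line,
      vrcLine_eq_segs _ false false [] (by simp),
      vrcLine_eq_segs _ false false [] (by simp)]
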